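-- pv_equiv track=rewrite | github.com/pmarcelino/ethics_course | generate_lectures.py | get_prev_next_titles
-- ===== SOURCE A (Python) =====
-- def get_prev_next_titles(lectures):
--     titles = [lec['title_en'] for lec in lectures]
--     prev_next = {}
--     for i, title in enumerate(titles):
--         prev_title = titles[i-1] if i > 0 else None
--         next_title = titles[i+1] if i < len(titles)-1 else None
--         prev_next[title] = (prev_title, next_title)
--     return prev_next
-- ===== SOURCE B (Python) =====
-- def get_prev_next_titles(lectures):
--     # Streaming/backpatching: one dict, one pass; each lecture's entry is created
--     # with next=None and the predecessor's entry is patched once the successor is seen.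
--     prev_next = {}
--     prev = None
--     for lec in lectures:
--         t = lec['title_en']
--         if prev is not None:
--             p, _ = prev_next[prev]
--             prev_next[prev] = (p, t)
--         prev_next[t] = (prev, None)
--         prev = t
--     return prev_next
-- ===== Notes on version B (the rewrite author's own statement) =====
-- stated objective: alternative
-- what changed: Replaces A's random-access indexing (titles[i-1]/titles[i+1] inside an enumerate loop over a precomputed title list) with a single streaming pass that keeps only the previous title and backpatches the predecessor's entry once its successor is seen.
import Mathlib
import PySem

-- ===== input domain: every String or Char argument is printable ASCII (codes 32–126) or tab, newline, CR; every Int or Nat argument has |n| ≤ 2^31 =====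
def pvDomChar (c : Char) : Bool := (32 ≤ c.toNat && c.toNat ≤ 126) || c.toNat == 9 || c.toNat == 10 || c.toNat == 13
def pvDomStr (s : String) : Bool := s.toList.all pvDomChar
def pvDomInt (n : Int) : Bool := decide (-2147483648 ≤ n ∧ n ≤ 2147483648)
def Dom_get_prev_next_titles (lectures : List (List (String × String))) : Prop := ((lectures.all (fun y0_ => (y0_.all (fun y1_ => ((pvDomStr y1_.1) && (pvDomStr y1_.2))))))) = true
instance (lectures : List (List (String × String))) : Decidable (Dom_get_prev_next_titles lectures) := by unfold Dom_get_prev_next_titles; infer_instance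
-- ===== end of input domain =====

-- B is a streaming one-pass alternative: it carries only the previous title and backpatches the
-- predecessor's dict entry, instead of A's indexed titles[i-1]/titles[i+1] lookups (same O(n) cost).

-- ===== PORT A =====
-- lec['title_en'] raises KeyError when absent; Pre_ excludes that, so '.getD ""' is never taken under Pre_.
def get_prev_next_titles (lectures : List (List (String × String))) : List (String × Option String × Option String) :=
  let titles : List String := lectures.map (fun lec => ((PySem.Dict.mk lec).get? "title_en").getD "")
  let prev_next : PySem.Dict String (Option String × Option String) :=
    (PySem.List.enumerate titles 0).foldl
      (fun d it =>
        let prev_title : Option String := if it.1 > 0 then PySem.List.pyGet? titles (it.1 - 1) else none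
        let next_title : Option String := if it.1 < PySem.List.len titles - 1 then PySem.List.pyGet? titles (it.1 + 1) else none
        d.insert it.2 (prev_title, next_title))
      PySem.Dict.empty
  prev_next.items

-- ===== PORT B =====
-- prev_next[prev] raises KeyError only if prev has no entry; prev always has one (it was inserted on
-- the previous iteration), so the '.getD (none, none)' default is never taken.
def get_prev_next_titles_alt (lectures : List (List (String × String))) : List (String × Option String × Option String) :=
  let st : PySem.Dict String (Option String × Option String) × Option String :=
    lectures.foldl
      (fun st lec =>
        let t : String := ((PySem.Dict.mk lec).get? "title_en").getD ""
        let d1 : PySem.Dict String (Option String × Option String) :=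
          match st.2 with
          | some pv =>
            let p : Option String := ((st.1.get? pv).getD (none, none)).1
            st.1.insert pv (p, some t)
          | none => st.1
        (d1.insert t (st.2, none), some t))
      (PySem.Dict.empty, none)
  st.1.items

-- ===== PRECONDITION & SPEC =====
-- Pre_ excludes exactly the inputs where lec['title_en'] raises KeyError (a lecture dict without the key).
def Pre_get_prev_next_titles (lectures : List (List (String × String))) : Prop :=
  (lectures.all (fun lec => lec.any (fun p => p.1 == "title_en"))) = true
instance (lectures : List (List (String × String))) : Decidable (Pre_get_prev_next_titles lectures) := by
  unfold Pre_get_prev_next_titles; infer_instance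
def pvWitness_get_prev_next_titles : (List (List (String × String))) :=
  [[("title_en", "Intro"), ("title_pt", "Introducao")], [("title_en", "Ethics")], [("title_en", "AI")]]

def Spec_get_prev_next_titles (lectures : List (List (String × String))) (out : List (String × Option String × Option String)) : Prop := out = get_prev_next_titles_alt lectures
instance (lectures : List (List (String × String))) (out : List (String × Option String × Option String)) : Decidable (Spec_get_prev_next_titles lectures out) := by unfold Spec_get_prev_next_titles; infer_instance

-- ===== CLAIM (what is proved, stated in full; the proofs are below) =====
def Claim_equal_get_prev_next_titles : Prop := ∀ (lectures : List (List (String × String))), Dom_get_prev_next_titles lectures → Pre_get_prev_next_titles lectures → Spec_get_prev_next_titles lectures (get_prev_next_titles lectures)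

-- ===== LEMMAS AND PROOFS =====

-- the (key, value) pairs A's loop inserts, read off the enumerate list
def pvPairsA (titles : List String) : List (String × Option String × Option String) :=
  (PySem.List.enumerate titles 0).map
    (fun it =>
      (it.2,
       (if it.1 > 0 then PySem.List.pyGet? titles (it.1 - 1) else none),
       (if it.1 < PySem.List.len titles - 1 then PySem.List.pyGet? titles (it.1 + 1) else none)))

-- the same pairs written with the carried previous title made explicit
def pvPairsZ (prev : Option String) (titles : List String) : List (String × Option String × Option String) :=
  titles.zip ((prev :: titles.dropLast.map some).zip ((titles.tail.map some) ++ [none]))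

theorem pvPairs_eq (titles : List String) : pvPairsA titles = pvPairsZ none titles := by
  apply List.ext_getElem
  · simp [pvPairsA, pvPairsZ, PySem.List.length_enumerate]
    omega
  · intro i h1 h2
    have hlen : i < titles.length := by
      simpa [pvPairsA, PySem.List.length_enumerate] using h1
    simp only [pvPairsA, pvPairsZ, List.getElem_map, PySem.List.getElem_enumerate,
      List.getElem_zip]
    refine Prod.ext (by simp) (Prod.ext ?_ ?_)
    · -- prev component
      rcases Nat.eq_zero_or_pos i with hi | hi
      · subst hi; simp
      · have : ((0 : Int) + i) - 1 = ((i - 1 : Nat) : Int) := by omega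
        simp only [this, PySem.List.pyGet?_natCast]
        have hi' : (0 : Int) + (i:Int) > 0 := by omega
        rw [if_pos hi']
        have h1' : i - 1 < titles.dropLast.length := by simp [List.length_dropLast]; omega
        simp [List.getElem_cons, List.getElem_map, hi.ne', List.getElem_dropLast,
          List.getElem?_eq_getElem (by omega : i - 1 < titles.length)]
    · -- next component
      rcases Nat.lt_or_ge i (titles.length - 1) with hi | hi
      · have hcond : (0 : Int) + i < PySem.List.len titles - 1 := by
          simp [PySem.List.len_eq]; omega
        have : ((0 : Int) + i) + 1 = ((i + 1 : Nat) : Int) := by omega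
        rw [if_pos hcond, this, PySem.List.pyGet?_natCast]
        have htl : i < titles.tail.length := by simp [List.length_tail]; omega
        rw [List.getElem_append_left (by simpa using htl)]
        simp [List.getElem_map, List.getElem_tail,
          List.getElem?_eq_getElem (by omega : i + 1 < titles.length)]
      · have hieq : i = titles.length - 1 := by omega
        have hcond : ¬ ((0 : Int) + i < PySem.List.len titles - 1) := by
          simp [PySem.List.len_eq]; omega
        rw [if_neg hcond]
        have hmt : (titles.tail.map some).length = titles.length - 1 := by
          simp [List.length_tail]
        rw [List.getElem_append_right (by omega)]
        simp [hieq]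

-- A's whole loop, written as structural recursion carrying the previous title
def pvAgo (prev : Option String) (titles : List String)
    (d : PySem.Dict String (Option String × Option String)) :
    PySem.Dict String (Option String × Option String) :=
  match titles with
  | [] => d
  | t :: ts => pvAgo (some t) ts (d.insert t (prev, ts.head?))

-- B's loop body, as structural recursion over the remaining titles
def pvBgo (d : PySem.Dict String (Option String × Option String)) (prev : Option String)
    (titles : List String) : PySem.Dict String (Option String × Option String) :=
  match titles with
  | [] => d
  | t :: ts =>
    let d1 := match prev with
      | some pv => d.insert pv (((d.get? pv).getD (none, none)).1, some t)
      | none => d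
    pvBgo (d1.insert t (prev, none)) (some t) ts

-- inserting A's explicit (key, value) pairs = running pvAgo
theorem pvFold_pairsZ (titles : List String) :
    ∀ (prev : Option String) (d : PySem.Dict String (Option String × Option String)),
      (pvPairsZ prev titles).foldl (fun d p => d.insert p.1 p.2) d = pvAgo prev titles d := by
  induction titles with
  | nil => intro prev d; rfl
  | cons t us ih =>
    intro prev d
    cases us with
    | nil => rfl
    | cons u vs =>
      show ((t, (prev, some u)) :: pvPairsZ (some t) (u :: vs)).foldl
          (fun d p => d.insert p.1 p.2) d = _
      simp only [List.foldl_cons]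
      exact ih (some t) (d.insert t (prev, some u))

-- the key step: B's delayed backpatching of the predecessor's entry equals A's direct insertion
theorem pvMain (titles : List String) :
    ∀ (t : String) (prev : Option String) (d : PySem.Dict String (Option String × Option String)),
      pvBgo (d.insert t (prev, none)) (some t) titles = pvAgo prev (t :: titles) d := by
  induction titles with
  | nil => intro t prev d; rfl
  | cons u us ih =>
    intro t prev d
    show pvBgo
        (((d.insert t (prev, none)).insert t
            ((((d.insert t (prev, none)).get? t).getD (none, none)).1, some u)).insert u
          (some t, none)) (some u) us = _
    rw [PySem.Dict.get?_insert_self, PySem.Dict.insert_insert_self]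
    exact ih u (some t) (d.insert t (prev, some u))

theorem pvBgo_eq_pvAgo (titles : List String) :
    pvBgo PySem.Dict.empty none titles = pvAgo none titles PySem.Dict.empty := by
  cases titles with
  | nil => rfl
  | cons t ts =>
    show pvBgo (PySem.Dict.empty.insert t (none, none)) (some t) ts = _
    exact pvMain ts t none PySem.Dict.empty

-- B's foldl over the lectures, rewritten as pvBgo over the extracted titles
theorem pvBfold_eq (lectures : List (List (String × String))) :
    ∀ (d : PySem.Dict String (Option String × Option String)) (prev : Option String),
      (lectures.foldl
        (fun st lec =>
          let t : String := ((PySem.Dict.mk lec).get? "title_en").getD ""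
          let d1 : PySem.Dict String (Option String × Option String) :=
            match st.2 with
            | some pv => st.1.insert pv (((st.1.get? pv).getD (none, none)).1, some t)
            | none => st.1
          (d1.insert t (st.2, none), some t))
        (d, prev)).1
      = pvBgo d prev (lectures.map (fun lec => ((PySem.Dict.mk lec).get? "title_en").getD "")) := by
  induction lectures with
  | nil => intro d prev; rfl
  | cons lec ls ih =>
    intro d prev
    cases prev with
    | none =>
      simp only [List.map_cons, List.foldl_cons, pvBgo]
      exact ih _ _
    | some pv =>
      simp only [List.map_cons, List.foldl_cons, pvBgo]
      exact ih _ _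

theorem pvAfold_eq (titles : List String) :
    (PySem.List.enumerate titles 0).foldl
      (fun d it =>
        let prev_title : Option String := if it.1 > 0 then PySem.List.pyGet? titles (it.1 - 1) else none
        let next_title : Option String := if it.1 < PySem.List.len titles - 1 then PySem.List.pyGet? titles (it.1 + 1) else none
        d.insert it.2 (prev_title, next_title))
      PySem.Dict.empty
    = pvAgo none titles PySem.Dict.empty := by
  have hA : (PySem.List.enumerate titles 0).foldl
      (fun d it =>
        let prev_title : Option String := if it.1 > 0 then PySem.List.pyGet? titles (it.1 - 1) else none
        let next_title : Option String := if it.1 < PySem.List.len titles - 1 then PySem.List.pyGet? titles (it.1 + 1) else none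
        d.insert it.2 (prev_title, next_title))
      PySem.Dict.empty
      = (pvPairsA titles).foldl (fun d p => d.insert p.1 p.2) PySem.Dict.empty := by
    unfold pvPairsA; rw [List.foldl_map]
  rw [hA, pvPairs_eq, pvFold_pairsZ]

theorem ports_eq (lectures : List (List (String × String))) :
    get_prev_next_titles lectures = get_prev_next_titles_alt lectures := by
  unfold get_prev_next_titles get_prev_next_titles_alt
  exact congrArg PySem.Dict.items
    ((pvAfold_eq (lectures.map (fun lec => ((PySem.Dict.mk lec).get? "title_en").getD ""))).trans
      ((pvBgo_eq_pvAgo _).symm.trans (pvBfold_eq lectures PySem.Dict.empty none).symm))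

-- ===== VERDICT (by name: the statement is the Claim_ definition above) =====
theorem get_prev_next_titles_spec : Claim_equal_get_prev_next_titles := by
  intro lectures _ _
  unfold Spec_get_prev_next_titles
  exact ports_eq lectures
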